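-- pv_equiv track=rewrite | github.com/jaxn/wnr-2025 | parse_chat.py | _compute_position_ranges
-- ===== SOURCE A (Python) =====
-- from typing import Dict, List, Tuple, Optional, Set, Iterable
-- from collections import defaultdict, namedtuple, deque
--
-- def _compute_position_ranges(boats: Iterable[str], edges: List[Tuple[str, str]]) -> Dict[str, Tuple[int, int]]:
--     """Given a (possibly) partially ordered set of boats (edges a->b means a ahead b),
--     compute possible position range [min,max] for each boat (1-indexed)."""
--     boats = list(boats)
--     n = len(boats)
--     graph_fwd = defaultdict(set)
--     graph_rev = defaultdict(set)
--     for a, b in edges: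
--         graph_fwd[a].add(b)
--         graph_rev[b].add(a)
--
--     def ancestors(b: str) -> Set[str]:
--         seen = set()
--         stack = [b]
--         while stack:
--             cur = stack.pop()
--             for p in graph_rev[cur]:
--                 if p not in seen:
--                     seen.add(p)
--                     stack.append(p)
--         return seen
--
--     def descendants(b: str) -> Set[str]:
--         seen = set()
--         stack = [b]
--         while stack:
--             cur = stack.pop()
--             for c in graph_fwd[cur]:
--                 if c not in seen:
--                     seen.add(c)
--                     stack.append(c)
--         return seen
--
--     ranges = {}
--     for b in boats:
--         anc = ancestors(b)
--         desc = descendants(b)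
--         min_pos = len(anc) + 1
--         max_pos = n - len(desc)
--         ranges[b] = (min_pos, max_pos)
--     return ranges
-- ===== SOURCE B (Python) =====
-- def _compute_position_ranges(boats, edges):
--     """Compute possible position range [min,max] per boat (1-indexed) from the
--     partial order given by edges (a ahead of b). Instead of two DFS walks per
--     boat, saturate a descendant set once per edge source and count ancestors
--     of a boat by membership in those sets."""
--     boats = list(boats)
--     n = len(boats)
--     succ = {}
--     for a, b in edges:
--         succ.setdefault(a, set()).add(b)
--     desc = {}
--     for a in succ:
--         cur = set(succ[a])
--         while True:
--             new = set()
--             for y in cur: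
--                 new |= succ.get(y, set())
--             new -= cur
--             if not new:
--                 break
--             cur |= new
--         desc[a] = cur
--     ranges = {}
--     for b in boats:
--         d = desc.get(b, set())
--         anc = sum(1 for a in desc if b in desc[a])
--         ranges[b] = (anc + 1, n - len(d))
--     return ranges
-- ===== Notes on version B (the rewrite author's own statement) =====
-- stated objective: alternative
-- what changed: A runs two DFS worklist walks (ancestors and descendants) for every boat; B saturates one descendant set per edge source globally, then reads each boat's range off those sets: max from its own descendant set, min by counting the sources whose descendant set contains the boat, so the per-boat reverse DFS disappears.
import Mathlib
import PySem

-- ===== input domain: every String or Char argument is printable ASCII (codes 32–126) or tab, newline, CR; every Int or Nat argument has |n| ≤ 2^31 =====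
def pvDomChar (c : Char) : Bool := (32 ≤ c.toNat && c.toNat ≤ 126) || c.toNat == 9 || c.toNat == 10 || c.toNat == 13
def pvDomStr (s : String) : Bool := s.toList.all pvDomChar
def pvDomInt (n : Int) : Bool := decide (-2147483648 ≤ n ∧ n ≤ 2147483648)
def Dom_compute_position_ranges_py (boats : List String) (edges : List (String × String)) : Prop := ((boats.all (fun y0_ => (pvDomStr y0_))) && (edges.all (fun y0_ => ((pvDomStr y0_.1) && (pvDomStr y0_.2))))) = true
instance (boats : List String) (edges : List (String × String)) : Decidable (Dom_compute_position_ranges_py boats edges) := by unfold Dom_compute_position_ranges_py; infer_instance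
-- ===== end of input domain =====

-- B replaces A's two DFS walks per boat by one global descendant-set saturation per edge
-- source plus membership counting; objective: alternative (same result, different algorithm).

-- ===== PORT A =====
-- graph_fwd / graph_rev: one pass over edges filling two defaultdict(set)
def pvGraphsA (edges : List (String × String)) :
    PySem.Dict String (PySem.Set String) × PySem.Dict String (PySem.Set String) :=
  edges.foldl
    (fun g e =>
      (g.1.modify e.1 PySem.Set.empty (fun s => PySem.Set.add s e.2),
       g.2.modify e.2 PySem.Set.empty (fun s => PySem.Set.add s e.1)))
    (PySem.Dict.empty, PySem.Dict.empty)

-- loop body of A's DFS: 'if p not in seen: seen.add(p); stack.append(p)'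
def pvDfsPush (st : PySem.Set String × List String) (p : String) :
    PySem.Set String × List String :=
  if PySem.Set.contains st.1 p then st else (PySem.Set.add st.1 p, p :: st.2)

-- A's 'while stack' worklist loop (stack head = Python's list end); the fuel argument
-- only makes the recursion structural — 2*len(edges)+2 always outlasts the loop.
def pvDfsA (g : PySem.Dict String (PySem.Set String)) :
    Nat → PySem.Set String → List String → PySem.Set String
  | 0, seen, _ => seen
  | fuel+1, seen, stack =>
    match stack with
    | [] => seen
    | cur :: rest =>
      let st := (g.getD cur PySem.Set.empty).foldl pvDfsPush (seen, rest)
      pvDfsA g fuel st.1 st.2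

def compute_position_ranges_py (boats : List String) (edges : List (String × String)) :
    List (String × Int × Int) :=
  let n : Int := PySem.List.len boats
  let g := pvGraphsA edges
  (boats.foldl
    (fun (r : PySem.Dict String (Int × Int)) b =>
      r.insert b
        (PySem.Set.len (pvDfsA g.2 (2 * edges.length + 2) PySem.Set.empty [b]) + 1,
         n - PySem.Set.len (pvDfsA g.1 (2 * edges.length + 2) PySem.Set.empty [b])))
    PySem.Dict.empty).items

-- ===== PORT B =====
-- succ: {a: set of direct successors} (setdefault(a, set()).add(b))
def pvSucc (edges : List (String × String)) : PySem.Dict String (PySem.Set String) :=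
  edges.foldl
    (fun d e => d.insert e.1 (PySem.Set.add (d.getD e.1 PySem.Set.empty) e.2))
    PySem.Dict.empty

-- B's 'while True' saturation round; fuel len(edges)+1 only makes it structural
-- (each non-final round strictly grows cur).
def pvSat (succ : PySem.Dict String (PySem.Set String)) :
    Nat → PySem.Set String → PySem.Set String
  | 0, cur => cur
  | fuel+1, cur =>
    let big := cur.foldl (fun acc y => PySem.Set.union acc (succ.getD y PySem.Set.empty))
      PySem.Set.empty
    let new := PySem.Set.diff big cur
    if new.isEmpty then cur else pvSat succ fuel (PySem.Set.union cur new)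

-- desc: descendant set for every edge source
def pvDesc (edges : List (String × String)) : PySem.Dict String (PySem.Set String) :=
  (pvSucc edges).keys.foldl
    (fun dd a =>
      dd.insert a (pvSat (pvSucc edges) (edges.length + 1)
        (PySem.Set.ofList ((pvSucc edges).getD a PySem.Set.empty))))
    PySem.Dict.empty

def compute_position_ranges_py_alt (boats : List String) (edges : List (String × String)) :
    List (String × Int × Int) :=
  let n : Int := PySem.List.len boats
  let desc := pvDesc edges
  (boats.foldl
    (fun (r : PySem.Dict String (Int × Int)) b =>
      r.insert b
        (PySem.List.len (desc.items.filter (fun p => PySem.Set.contains p.2 b)) + 1,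
         n - PySem.Set.len (desc.getD b PySem.Set.empty)))
    PySem.Dict.empty).items

-- ===== PRECONDITION & SPEC =====
def Spec_compute_position_ranges_py (boats : List String) (edges : List (String × String)) (out : List (String × Int × Int)) : Prop := out = compute_position_ranges_py_alt boats edges
instance (boats : List String) (edges : List (String × String)) (out : List (String × Int × Int)) : Decidable (Spec_compute_position_ranges_py boats edges out) := by unfold Spec_compute_position_ranges_py; infer_instance

-- ===== CLAIM (what is proved, stated in full; the proofs are below) =====
def Claim_equal_compute_position_ranges_py : Prop := ∀ (boats : List String) (edges : List (String × String)), Dom_compute_position_ranges_py boats edges → Spec_compute_position_ranges_py boats edges (compute_position_ranges_py boats edges)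

-- ===== LEMMAS AND PROOFS =====

-- Python's 'a reaches b along ≥ 1 edges' (a ahead of b)
inductive pvReaches (edges : List (String × String)) : String → String → Prop
  | base {a b : String} : (a, b) ∈ edges → pvReaches edges a b
  | step {a b c : String} : pvReaches edges a b → (b, c) ∈ edges → pvReaches edges a c

-- closure of the seeds S under a neighbour function N
inductive pvCl (N : String → List String) (S : String → Prop) : String → Prop
  | base {x : String} : S x → pvCl N S x
  | step {x y : String} : pvCl N S x → y ∈ N x → pvCl N S y

theorem pvCl_mono {N : String → List String} {S S' : String → Prop}
    (h : ∀ z, S z → pvCl N S' z) {x : String} (hx : pvCl N S x) : pvCl N S' x := by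
  induction hx with
  | base hs => exact h _ hs
  | step _ hy ih => exact pvCl.step ih hy

theorem pvReaches_head {edges : List (String × String)} {a b c : String}
    (h : (a, b) ∈ edges) (h2 : pvReaches edges b c) : pvReaches edges a c := by
  induction h2 with
  | base h' => exact .step (.base h) h'
  | step _ he ih => exact .step ih he

theorem pvReaches_start {edges : List (String × String)} {a c : String}
    (h : pvReaches edges a c) : a ∈ edges.map Prod.fst := by
  induction h with
  | base h' => exact List.mem_map.mpr ⟨_, h', rfl⟩
  | step _ _ ih => exact ih

theorem cl_fwd_iff {N : String → List String} {edges : List (String × String)}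
    (hN : ∀ x y, y ∈ N x ↔ (x, y) ∈ edges) (a x : String) :
    pvCl N (fun z => z ∈ N a) x ↔ pvReaches edges a x := by
  constructor
  · intro h
    induction h with
    | base hs => exact .base ((hN _ _).mp hs)
    | step _ hy ih => exact .step ih ((hN _ _).mp hy)
  · intro h
    induction h with
    | base h' => exact .base ((hN _ _).mpr h')
    | step _ he ih => exact pvCl.step ih ((hN _ _).mpr he)

theorem cl_rev_iff {N : String → List String} {edges : List (String × String)}
    (hN : ∀ x y, y ∈ N x ↔ (y, x) ∈ edges) (b x : String) :
    pvCl N (fun z => z ∈ N b) x ↔ pvReaches edges x b := by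
  constructor
  · intro h
    induction h with
    | base hs => exact .base ((hN _ _).mp hs)
    | step _ hy ih => exact pvReaches_head ((hN _ _).mp hy) ih
  · intro h
    induction h with
    | base h' => exact .base ((hN _ _).mpr h')
    | step _ he ih =>
      exact pvCl_mono (fun z hz => pvCl.step (pvCl.base ((hN _ _).mpr he)) hz) ih

-- ---- adjacency-dict construction ----

theorem pvModify_eq_insert (d : PySem.Dict String (PySem.Set String)) (k : String)
    (f : PySem.Set String → PySem.Set String) :
    d.modify k PySem.Set.empty f = d.insert k (f (d.getD k PySem.Set.empty)) := rfl

def pvFoldAdj (k v : String × String → String) (l : List (String × String))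
    (d : PySem.Dict String (PySem.Set String)) : PySem.Dict String (PySem.Set String) :=
  l.foldl (fun d e => d.insert (k e) (PySem.Set.add (d.getD (k e) PySem.Set.empty) (v e))) d

-- (PySem.List.foldl_prod_mk does not unify here: the lambda applies its state through
-- projections of a pair bound variable, which is outside the rewritable pattern fragment)
theorem pvGraphsA_aux :
    ∀ (l : List (String × String)) (d1 d2 : PySem.Dict String (PySem.Set String)),
      l.foldl
        (fun g e =>
          (g.1.modify e.1 PySem.Set.empty (fun s => PySem.Set.add s e.2),
           g.2.modify e.2 PySem.Set.empty (fun s => PySem.Set.add s e.1))) (d1, d2)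
        = (pvFoldAdj Prod.fst Prod.snd l d1, pvFoldAdj Prod.snd Prod.fst l d2) := by
  intro l
  induction l with
  | nil => intro d1 d2; rfl
  | cons e l ih =>
    intro d1 d2
    simp only [List.foldl_cons, pvModify_eq_insert, pvFoldAdj] at *
    rw [ih]

theorem pvGraphsA_eq (edges : List (String × String)) :
    pvGraphsA edges = (pvFoldAdj Prod.fst Prod.snd edges PySem.Dict.empty,
                       pvFoldAdj Prod.snd Prod.fst edges PySem.Dict.empty) := by
  unfold pvGraphsA
  exact pvGraphsA_aux edges PySem.Dict.empty PySem.Dict.empty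

theorem pvSucc_eq (edges : List (String × String)) :
    pvSucc edges = pvFoldAdj Prod.fst Prod.snd edges PySem.Dict.empty := rfl

theorem pvFoldAdj_getD_mem (k v : String × String → String) :
    ∀ (l : List (String × String)) (d : PySem.Dict String (PySem.Set String)) (x y : String),
      (y ∈ ((pvFoldAdj k v l d).getD x PySem.Set.empty : List String) ↔
        y ∈ (d.getD x PySem.Set.empty : List String) ∨ ∃ e ∈ l, k e = x ∧ v e = y) := by
  intro l
  induction l with
  | nil => intro d x y; simp [pvFoldAdj]
  | cons e l ih =>
    intro d x y
    have h := ih (d.insert (k e) (PySem.Set.add (d.getD (k e) PySem.Set.empty) (v e))) x y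
    simp only [pvFoldAdj, List.foldl_cons] at h ⊢
    rw [h, PySem.Dict.getD_insert, List.exists_mem_cons_iff]
    by_cases hx : x = k e
    · rw [hx, if_pos rfl, PySem.Set.mem_add]
      constructor
      · rintro (⟨h1 | h1⟩ | hE)
        · exact Or.inl h1
        · exact Or.inr (Or.inl ⟨rfl, h1.symm⟩)
        · exact Or.inr (Or.inr hE)
      · rintro (h1 | ⟨_, h2⟩ | hE)
        · exact Or.inl (Or.inl h1)
        · exact Or.inl (Or.inr h2.symm)
        · exact Or.inr hE
    · simp only [if_neg hx]
      constructor
      · rintro (h1 | hE)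
        · exact Or.inl h1
        · exact Or.inr (Or.inr hE)
      · rintro (h1 | ⟨h2, _⟩ | hE)
        · exact Or.inl h1
        · exact absurd h2.symm hx
        · exact Or.inr hE

theorem pvFoldAdj_keys_mem (k v : String × String → String) :
    ∀ (l : List (String × String)) (d : PySem.Dict String (PySem.Set String)) (x : String),
      (x ∈ (pvFoldAdj k v l d).keys ↔ x ∈ d.keys ∨ x ∈ l.map k) := by
  intro l
  induction l with
  | nil => intro d x; simp [pvFoldAdj]
  | cons e l ih =>
    intro d x
    simp only [pvFoldAdj, List.foldl_cons] at *
    rw [ih]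
    rw [PySem.Dict.mem_keys_insert]
    simp [List.mem_cons]
    tauto

theorem pvFoldAdj_keys_nodup (k v : String × String → String) :
    ∀ (l : List (String × String)) (d : PySem.Dict String (PySem.Set String)),
      d.keys.Nodup → (pvFoldAdj k v l d).keys.Nodup := by
  intro l
  induction l with
  | nil => intro d hd; simpa [pvFoldAdj] using hd
  | cons e l ih =>
    intro d hd
    simp only [pvFoldAdj, List.foldl_cons]
    exact ih _ (PySem.Dict.nodup_keys_insert _ _ _ hd)

theorem mem_succ_getD (edges : List (String × String)) (x y : String) :
    y ∈ ((pvSucc edges).getD x PySem.Set.empty : List String) ↔ (x, y) ∈ edges := by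
  rw [pvSucc_eq, pvFoldAdj_getD_mem]
  simp [PySem.Dict.getD_empty, PySem.Set.empty]

theorem mem_fwdA_getD (edges : List (String × String)) (x y : String) :
    y ∈ (((pvGraphsA edges).1).getD x PySem.Set.empty : List String) ↔ (x, y) ∈ edges := by
  rw [pvGraphsA_eq]
  rw [pvFoldAdj_getD_mem]
  simp [PySem.Dict.getD_empty, PySem.Set.empty]

theorem mem_revA_getD (edges : List (String × String)) (x y : String) :
    y ∈ (((pvGraphsA edges).2).getD x PySem.Set.empty : List String) ↔ (y, x) ∈ edges := by
  rw [pvGraphsA_eq]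
  rw [pvFoldAdj_getD_mem]
  simp [PySem.Dict.getD_empty, PySem.Set.empty]

theorem mem_succ_keys (edges : List (String × String)) (x : String) :
    x ∈ (pvSucc edges).keys ↔ x ∈ edges.map Prod.fst := by
  rw [pvSucc_eq, pvFoldAdj_keys_mem]
  simp [PySem.Dict.keys_empty]

theorem succ_keys_nodup (edges : List (String × String)) : (pvSucc edges).keys.Nodup := by
  rw [pvSucc_eq]
  exact pvFoldAdj_keys_nodup _ _ edges PySem.Dict.empty
    (by simp [PySem.Dict.keys_empty])

-- ---- A's DFS worklist loop computes exactly the closure ----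

theorem pvDfs_fold_delta (L : List String) :
    ∀ (seen : PySem.Set String) (stack : List String),
      ∃ Δ : List String,
        L.foldl pvDfsPush (seen, stack) = (seen ++ Δ, Δ.reverse ++ stack) ∧
        Δ.Nodup ∧ (∀ x ∈ Δ, x ∈ L ∧ x ∉ seen) ∧ (∀ y ∈ L, y ∈ seen ++ Δ) := by
  induction L with
  | nil => intro seen stack; exact ⟨[], by simp, by simp, by simp, by simp⟩
  | cons p L ih =>
    intro seen stack
    by_cases hp : p ∈ seen
    · obtain ⟨Δ, heq, hnd, hmem, hsub⟩ := ih seen stack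
      refine ⟨Δ, ?_, hnd, ?_, ?_⟩
      · simpa [pvDfsPush, PySem.Set.contains_iff, hp] using heq
      · intro x hx; exact ⟨List.mem_cons_of_mem _ (hmem x hx).1, (hmem x hx).2⟩
      · intro y hy
        rcases List.mem_cons.mp hy with rfl | hy'
        · exact List.mem_append.mpr (Or.inl hp)
        · exact hsub y hy'
    · obtain ⟨Δ, heq, hnd, hmem, hsub⟩ := ih (seen ++ [p]) (p :: stack)
      refine ⟨p :: Δ, ?_, ?_, ?_, ?_⟩
      · have h1 : List.foldl pvDfsPush (seen, stack) (p :: L)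
            = List.foldl pvDfsPush (seen ++ [p], p :: stack) L := by
          simp [pvDfsPush, hp]
        rw [h1, heq]
        simp
      · refine List.Nodup.cons ?_ hnd
        intro hpΔ
        exact absurd (List.mem_append.mpr (Or.inr (List.mem_singleton.mpr rfl)))
          (hmem p hpΔ).2
      · intro x hx
        rcases List.mem_cons.mp hx with rfl | hx'
        · exact ⟨List.mem_cons_self, hp⟩
        · refine ⟨List.mem_cons_of_mem _ (hmem x hx').1, ?_⟩
          intro hxs
          exact (hmem x hx').2 (List.mem_append.mpr (Or.inl hxs))
      · intro y hy
        rcases List.mem_cons.mp hy with rfl | hy'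
        · simp
        · have := hsub y hy'
          simp only [List.append_assoc, List.singleton_append] at this
          exact this

theorem pvDfsA_spec (g : PySem.Dict String (PySem.Set String)) (U : List String) (b : String)
    (_hU : U.Nodup)
    (hNU : ∀ x y, y ∈ (g.getD x PySem.Set.empty : List String) → y ∈ U) :
    ∀ (fuel : Nat) (seen : PySem.Set String) (stack : List String),
      seen.Nodup →
      (∀ x ∈ seen, x ∈ U) →
      (∀ x ∈ seen, pvCl (fun z => (g.getD z PySem.Set.empty : List String))
        (fun z => z ∈ (g.getD b PySem.Set.empty : List String)) x) →
      (∀ s ∈ stack, s = b ∨ s ∈ seen) →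
      (∀ x, (x = b ∨ x ∈ seen) → x ∉ stack →
        ∀ y ∈ (g.getD x PySem.Set.empty : List String), y ∈ seen) →
      2 * (U.length - seen.length) + stack.length < fuel →
      (pvDfsA g fuel seen stack).Nodup ∧
      (∀ x, x ∈ pvDfsA g fuel seen stack ↔
        pvCl (fun z => (g.getD z PySem.Set.empty : List String))
          (fun z => z ∈ (g.getD b PySem.Set.empty : List String)) x) := by
  intro fuel
  induction fuel with
  | zero => intro seen stack _ _ _ _ _ hm; exact absurd hm (Nat.not_lt_zero _)
  | succ fuel ih =>
    intro seen stack h1 h2 h3 h4 h5 hm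
    cases stack with
    | nil =>
      refine ⟨h1, fun x => ⟨fun hx => h3 x hx, fun h => ?_⟩⟩
      induction h with
      | base hs => exact h5 b (Or.inl rfl) (by simp) _ hs
      | step _ hy ihh => exact h5 _ (Or.inr ihh) (by simp) _ hy
    | cons cur rest =>
      obtain ⟨Δ, heq, hΔnd, hΔmem, hLsub⟩ :=
        pvDfs_fold_delta (g.getD cur PySem.Set.empty : List String) seen rest
      have hred : pvDfsA g (fuel+1) seen (cur :: rest)
          = pvDfsA g fuel (seen ++ Δ) (Δ.reverse ++ rest) := by
        show pvDfsA g fuel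
          (((g.getD cur PySem.Set.empty : List String).foldl pvDfsPush (seen, rest)).1)
          (((g.getD cur PySem.Set.empty : List String).foldl pvDfsPush (seen, rest)).2) = _
        rw [heq]
      rw [hred]
      have hcurOK : cur = b ∨ cur ∈ seen := h4 cur List.mem_cons_self
      have hΔU : ∀ x ∈ Δ, x ∈ U := fun x hx => hNU cur x (hΔmem x hx).1
      have hdisj : seen.Disjoint Δ := by
        intro a ha ha'
        exact (hΔmem a ha').2 ha
      have h1' : (seen ++ Δ).Nodup := h1.append hΔnd hdisj
      have h2' : ∀ x ∈ seen ++ Δ, x ∈ U := by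
        intro x hx
        rcases List.mem_append.mp hx with hx' | hx'
        · exact h2 x hx'
        · exact hΔU x hx'
      have hsub2 : (seen ++ Δ) ⊆ U := by intro a ha; exact h2' a ha
      have hlen : (seen ++ Δ).length ≤ U.length := (h1'.subperm hsub2).length_le
      apply ih (seen ++ Δ) (Δ.reverse ++ rest) h1' h2'
      · intro x hx
        rcases List.mem_append.mp hx with hx' | hx'
        · exact h3 x hx'
        · rcases hcurOK with rfl | hcs
          · exact pvCl.base (hΔmem x hx').1
          · exact pvCl.step (h3 cur hcs) (hΔmem x hx').1
      · intro s hs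
        rcases List.mem_append.mp hs with hs' | hs'
        · exact Or.inr (List.mem_append.mpr (Or.inr (List.mem_reverse.mp hs')))
        · rcases h4 s (List.mem_cons_of_mem _ hs') with rfl | hss
          · exact Or.inl rfl
          · exact Or.inr (List.mem_append.mpr (Or.inl hss))
      · intro x hx hnx y hy
        by_cases hxc : x = cur
        · subst hxc
          exact hLsub y hy
        · have hxΔ : x ∉ Δ := by
            intro hxd
            exact hnx (List.mem_append.mpr (Or.inl (List.mem_reverse.mpr hxd)))
          have hx' : x = b ∨ x ∈ seen := by
            rcases hx with rfl | hxs
            · exact Or.inl rfl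
            · rcases List.mem_append.mp hxs with h | h
              · exact Or.inr h
              · exact absurd h hxΔ
          have hnx' : x ∉ cur :: rest := by
            intro hmem'
            rcases List.mem_cons.mp hmem' with rfl | hr
            · exact hxc rfl
            · exact hnx (List.mem_append.mpr (Or.inr hr))
          exact List.mem_append.mpr (Or.inl (h5 x hx' hnx' y hy))
      · have e1 : (seen ++ Δ).length = seen.length + Δ.length := List.length_append ..
        have e2 : (Δ.reverse ++ rest).length = Δ.length + rest.length := by
          simp
        simp only [List.length_cons] at hm
        omega

-- ---- B's saturation loop computes exactly the closure ----

theorem pvSat_fold_union_mem (succ : PySem.Dict String (PySem.Set String)) :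
    ∀ (l : List String) (acc : PySem.Set String) (x : String),
      x ∈ l.foldl (fun acc y => PySem.Set.union acc (succ.getD y PySem.Set.empty)) acc ↔
        x ∈ acc ∨ ∃ y ∈ l, x ∈ (succ.getD y PySem.Set.empty : List String) := by
  intro l
  induction l with
  | nil => intro acc x; simp
  | cons p l ih =>
    intro acc x
    simp only [List.foldl_cons]
    rw [ih, PySem.Set.mem_union]
    simp [List.mem_cons]
    tauto

theorem pvSat_spec (succ : PySem.Dict String (PySem.Set String)) (U : List String)
    (S0 : List String) (_hU : U.Nodup)
    (hNU : ∀ x y, y ∈ (succ.getD x PySem.Set.empty : List String) → y ∈ U) :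
    ∀ (fuel : Nat) (cur : PySem.Set String),
      cur.Nodup →
      (∀ x ∈ cur, x ∈ U) →
      (∀ x ∈ S0, x ∈ cur) →
      (∀ x ∈ cur, pvCl (fun z => (succ.getD z PySem.Set.empty : List String))
        (fun z => z ∈ S0) x) →
      U.length - cur.length < fuel →
      (pvSat succ fuel cur).Nodup ∧
      (∀ x, x ∈ pvSat succ fuel cur ↔
        pvCl (fun z => (succ.getD z PySem.Set.empty : List String)) (fun z => z ∈ S0) x) := by
  intro fuel
  induction fuel with
  | zero => intro cur _ _ _ _ hm; exact absurd hm (Nat.not_lt_zero _)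
  | succ fuel ih =>
    intro cur h1 h2 h3 h4 hm
    by_cases hnew : (PySem.Set.diff
        (cur.foldl (fun acc y => PySem.Set.union acc (succ.getD y PySem.Set.empty))
          PySem.Set.empty) cur).isEmpty
    · have hred : pvSat succ (fuel+1) cur = cur := by
        show (if (PySem.Set.diff _ cur).isEmpty then cur else _) = cur
        rw [if_pos hnew]
      rw [hred]
      have hclosed : ∀ y ∈ cur, ∀ x ∈ (succ.getD y PySem.Set.empty : List String), x ∈ cur := by
        intro y hy x hx
        by_contra hxc
        have hbig : x ∈ cur.foldl
            (fun acc y => PySem.Set.union acc (succ.getD y PySem.Set.empty)) PySem.Set.empty := by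
          rw [pvSat_fold_union_mem]
          exact Or.inr ⟨y, hy, hx⟩
        have : x ∈ PySem.Set.diff
            (cur.foldl (fun acc y => PySem.Set.union acc (succ.getD y PySem.Set.empty))
              PySem.Set.empty) cur := (PySem.Set.mem_diff _ _ _).mpr ⟨hbig, hxc⟩
        rw [List.isEmpty_iff] at hnew
        rw [hnew] at this
        exact List.not_mem_nil this
      refine ⟨h1, fun x => ⟨fun hx => h4 x hx, fun h => ?_⟩⟩
      induction h with
      | base hs => exact h3 _ hs
      | step _ hy ihh => exact hclosed _ ihh _ hy
    · have hred : pvSat succ (fuel+1) cur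
          = pvSat succ fuel (PySem.Set.union cur (PySem.Set.diff
              (cur.foldl (fun acc y => PySem.Set.union acc (succ.getD y PySem.Set.empty))
                PySem.Set.empty) cur)) := by
        show (if (PySem.Set.diff _ cur).isEmpty then cur else _) = _
        rw [if_neg hnew]
      rw [hred]
      set big := cur.foldl (fun acc y => PySem.Set.union acc (succ.getD y PySem.Set.empty))
        PySem.Set.empty with hbigdef
      set nw := PySem.Set.diff big cur with hnwdef
      have hnwmem : ∀ x ∈ nw, x ∈ big ∧ x ∉ cur := fun x hx => (PySem.Set.mem_diff _ _ _).mp hx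
      have hbigmem : ∀ x ∈ big, ∃ y ∈ cur, x ∈ (succ.getD y PySem.Set.empty : List String) := by
        intro x hx
        rcases (pvSat_fold_union_mem succ cur PySem.Set.empty x).mp hx with h | h
        · exact absurd h List.not_mem_nil
        · exact h
      have hcur' : ∀ x, x ∈ PySem.Set.union cur nw ↔ x ∈ cur ∨ x ∈ nw :=
        fun x => PySem.Set.mem_union _ _ _
      have h1' : (PySem.Set.union cur nw).Nodup := PySem.Set.nodup_union _ _ h1
      obtain ⟨e, he⟩ := List.exists_mem_of_ne_nil nw (by
        intro hh; rw [hh] at hnew; simp at hnew)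
      have hlen : cur.length + 1 ≤ (PySem.Set.union cur nw).length := by
        have hsub : (e :: cur) ⊆ PySem.Set.union cur nw := by
          intro a ha
          rcases List.mem_cons.mp ha with rfl | ha'
          · exact (hcur' a).mpr (Or.inr he)
          · exact (hcur' a).mpr (Or.inl ha')
        have hnd : (e :: cur).Nodup := List.Nodup.cons (hnwmem e he).2 h1
        have := (hnd.subperm hsub).length_le
        simpa using this
      apply ih
      · exact h1'
      · intro x hx
        rcases (hcur' x).mp hx with h | h
        · exact h2 x h
        · obtain ⟨y, _, hxy⟩ := hbigmem x (hnwmem x h).1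
          exact hNU y x hxy
      · intro x hx
        exact (hcur' x).mpr (Or.inl (h3 x hx))
      · intro x hx
        rcases (hcur' x).mp hx with h | h
        · exact h4 x h
        · obtain ⟨y, hy, hxy⟩ := hbigmem x (hnwmem x h).1
          exact pvCl.step (h4 y hy) hxy
      · have hUcur : (PySem.Set.union cur nw).length ≤ U.length := by
          refine (h1'.subperm ?_).length_le
          intro a ha
          rcases (hcur' a).mp ha with h | h
          · exact h2 a h
          · obtain ⟨y, _, hay⟩ := hbigmem a (hnwmem a h).1
            exact hNU y a hay
        omega

-- ---- pvDesc as an association list, and its lookups ----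

theorem pvFoldInsert_getD (F : String → PySem.Set String) :
    ∀ (ks : List String) (d : PySem.Dict String (PySem.Set String)) (b : String), ks.Nodup →
      (ks.foldl (fun dd a => dd.insert a (F a)) d).getD b PySem.Set.empty
        = if b ∈ ks then F b else d.getD b PySem.Set.empty := by
  intro ks
  induction ks with
  | nil => intro d b _; simp
  | cons a ks ih =>
    intro d b hnd
    simp only [List.foldl_cons]
    rw [ih _ b (List.Nodup.of_cons hnd)]
    by_cases hb : b ∈ ks
    · rw [if_pos hb, if_pos (List.mem_cons_of_mem _ hb)]
    · rw [if_neg hb, PySem.Dict.getD_insert]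
      by_cases hba : b = a
      · subst hba; rw [if_pos rfl, if_pos List.mem_cons_self]
      · rw [if_neg hba, if_neg (by simp [List.mem_cons, hba, hb])]

theorem pvFoldInsert_items (F : String → PySem.Set String) :
    ∀ (ks : List String) (d : PySem.Dict String (PySem.Set String)), ks.Nodup →
      (∀ a ∈ ks, d.contains a = false) →
      (ks.foldl (fun dd a => dd.insert a (F a)) d).items
        = d.items ++ ks.map (fun a => (a, F a)) := by
  intro ks
  induction ks with
  | nil => intro d _ _; simp
  | cons a ks ih =>
    intro d hnd hc
    simp only [List.foldl_cons, List.map_cons]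
    rw [ih _ (List.Nodup.of_cons hnd), PySem.Dict.items_insert_of_not_contains _ _ (hc a List.mem_cons_self)]
    · simp
    · intro a' ha'
      rw [PySem.Dict.contains_insert]
      have hne : a' ≠ a := by
        intro hh; subst hh; exact (List.nodup_cons.mp hnd).1 ha'
      simp [hne, hc a' (List.mem_cons_of_mem _ ha')]

-- the saturation result for source a, and its characterisation
theorem pvSatFrom_spec (edges : List (String × String)) (a : String) :
    (pvSat (pvSucc edges) (edges.length + 1)
      (PySem.Set.ofList ((pvSucc edges).getD a PySem.Set.empty))).Nodup ∧
    ∀ x, x ∈ pvSat (pvSucc edges) (edges.length + 1)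
        (PySem.Set.ofList ((pvSucc edges).getD a PySem.Set.empty)) ↔
      pvReaches edges a x := by
  have hNU : ∀ x y, y ∈ ((pvSucc edges).getD x PySem.Set.empty : List String) →
      y ∈ PySem.Set.ofList (edges.map Prod.snd) := by
    intro x y hy
    rw [PySem.Set.mem_ofList]
    exact List.mem_map.mpr ⟨(x, y), (mem_succ_getD edges x y).mp hy, rfl⟩
  have hlen : (PySem.Set.ofList (edges.map Prod.snd)).length ≤ edges.length := by
    have := PySem.Set.length_ofList_le (edges.map Prod.snd)
    simpa using this
  have h := pvSat_spec (pvSucc edges) (PySem.Set.ofList (edges.map Prod.snd))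
    ((pvSucc edges).getD a PySem.Set.empty) (PySem.Set.nodup_ofList _) hNU
    (edges.length + 1)
    (PySem.Set.ofList ((pvSucc edges).getD a PySem.Set.empty))
    (PySem.Set.nodup_ofList _)
    (by
      intro x hx
      rw [PySem.Set.mem_ofList] at hx
      exact hNU a x hx)
    (by intro x hx; exact (PySem.Set.mem_ofList _ _).mpr hx)
    (by
      intro x hx
      rw [PySem.Set.mem_ofList] at hx
      exact pvCl.base hx)
    (by omega)
  refine ⟨h.1, fun x => ?_⟩
  rw [h.2 x]
  exact cl_fwd_iff (fun x y => mem_succ_getD edges x y) a x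

theorem pvDesc_getD (edges : List (String × String)) (b : String) :
    (pvDesc edges).getD b PySem.Set.empty
      = if b ∈ (pvSucc edges).keys
        then pvSat (pvSucc edges) (edges.length + 1)
          (PySem.Set.ofList ((pvSucc edges).getD b PySem.Set.empty))
        else PySem.Set.empty := by
  unfold pvDesc
  rw [pvFoldInsert_getD _ _ _ _ (succ_keys_nodup edges)]
  by_cases hb : b ∈ (pvSucc edges).keys
  · rw [if_pos hb, if_pos hb]
  · rw [if_neg hb, if_neg hb, PySem.Dict.getD_empty]

theorem pvDesc_items (edges : List (String × String)) :
    (pvDesc edges).items = (pvSucc edges).keys.map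
      (fun a => (a, pvSat (pvSucc edges) (edges.length + 1)
        (PySem.Set.ofList ((pvSucc edges).getD a PySem.Set.empty)))) := by
  unfold pvDesc
  rw [pvFoldInsert_items _ _ _ (succ_keys_nodup edges)
    (fun a _ => by simp)]
  have h0 : (PySem.Dict.empty : PySem.Dict String (PySem.Set String)).items = [] := rfl
  rw [h0, List.nil_append]

-- ---- membership characterisation of A's two DFS results ----

theorem pvDfsRev_spec (edges : List (String × String)) (b : String) :
    (pvDfsA (pvGraphsA edges).2 (2 * edges.length + 2) PySem.Set.empty [b]).Nodup ∧
    ∀ x, x ∈ pvDfsA (pvGraphsA edges).2 (2 * edges.length + 2) PySem.Set.empty [b] ↔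
      pvReaches edges x b := by
  have hNU : ∀ x y, y ∈ (((pvGraphsA edges).2).getD x PySem.Set.empty : List String) →
      y ∈ PySem.Set.ofList (edges.map Prod.fst) := by
    intro x y hy
    rw [PySem.Set.mem_ofList]
    exact List.mem_map.mpr ⟨(y, x), (mem_revA_getD edges x y).mp hy, rfl⟩
  have hlen : (PySem.Set.ofList (edges.map Prod.fst)).length ≤ edges.length := by
    have := PySem.Set.length_ofList_le (edges.map Prod.fst)
    simpa using this
  have h := pvDfsA_spec (pvGraphsA edges).2 (PySem.Set.ofList (edges.map Prod.fst)) b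
    (PySem.Set.nodup_ofList _) hNU (2 * edges.length + 2) PySem.Set.empty [b]
    (by simp [PySem.Set.empty]) (by simp [PySem.Set.empty]) (by simp [PySem.Set.empty])
    (by intro s hs; exact Or.inl (List.mem_singleton.mp hs))
    (by
      intro x hx hnx y hy
      rcases hx with rfl | hx'
      · exact absurd (List.mem_singleton.mpr rfl) hnx
      · exact absurd hx' (by simp [PySem.Set.empty]))
    (by simp [PySem.Set.empty]; omega)
  refine ⟨h.1, fun x => ?_⟩
  rw [h.2 x]
  exact cl_rev_iff (fun x y => mem_revA_getD edges x y) b x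

theorem pvDfsFwd_spec (edges : List (String × String)) (b : String) :
    (pvDfsA (pvGraphsA edges).1 (2 * edges.length + 2) PySem.Set.empty [b]).Nodup ∧
    ∀ x, x ∈ pvDfsA (pvGraphsA edges).1 (2 * edges.length + 2) PySem.Set.empty [b] ↔
      pvReaches edges b x := by
  have hNU : ∀ x y, y ∈ (((pvGraphsA edges).1).getD x PySem.Set.empty : List String) →
      y ∈ PySem.Set.ofList (edges.map Prod.snd) := by
    intro x y hy
    rw [PySem.Set.mem_ofList]
    exact List.mem_map.mpr ⟨(x, y), (mem_fwdA_getD edges x y).mp hy, rfl⟩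
  have hlen : (PySem.Set.ofList (edges.map Prod.snd)).length ≤ edges.length := by
    have := PySem.Set.length_ofList_le (edges.map Prod.snd)
    simpa using this
  have h := pvDfsA_spec (pvGraphsA edges).1 (PySem.Set.ofList (edges.map Prod.snd)) b
    (PySem.Set.nodup_ofList _) hNU (2 * edges.length + 2) PySem.Set.empty [b]
    (by simp [PySem.Set.empty]) (by simp [PySem.Set.empty]) (by simp [PySem.Set.empty])
    (by intro s hs; exact Or.inl (List.mem_singleton.mp hs))
    (by
      intro x hx hnx y hy
      rcases hx with rfl | hx'
      · exact absurd (List.mem_singleton.mpr rfl) hnx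
      · exact absurd hx' (by simp [PySem.Set.empty]))
    (by simp [PySem.Set.empty]; omega)
  refine ⟨h.1, fun x => ?_⟩
  rw [h.2 x]
  exact cl_fwd_iff (fun x y => mem_fwdA_getD edges x y) b x

-- ---- lengths agree ----

theorem pvLen_eq_of_mem_iff {l₁ l₂ : List String} (h₁ : l₁.Nodup) (h₂ : l₂.Nodup)
    (h : ∀ x, x ∈ l₁ ↔ x ∈ l₂) : l₁.length = l₂.length :=
  ((List.perm_ext_iff_of_nodup h₁ h₂).mpr h).length_eq

theorem pvAnc_len_eq (edges : List (String × String)) (b : String) :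
    (pvDfsA (pvGraphsA edges).2 (2 * edges.length + 2) PySem.Set.empty [b]).length
      = ((pvDesc edges).items.filter (fun p => PySem.Set.contains p.2 b)).length := by
  rw [pvDesc_items, List.filter_map, List.length_map]
  apply pvLen_eq_of_mem_iff (pvDfsRev_spec edges b).1
    ((succ_keys_nodup edges).filter _)
  intro a
  rw [(pvDfsRev_spec edges b).2 a, List.mem_filter]
  constructor
  · intro h
    refine ⟨(mem_succ_keys edges a).mpr (pvReaches_start h), ?_⟩
    exact (PySem.Set.contains_iff _ _).mpr (((pvSatFrom_spec edges a).2 b).mpr h)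
  · rintro ⟨_, h2⟩
    exact ((pvSatFrom_spec edges a).2 b).mp ((PySem.Set.contains_iff _ _).mp h2)

theorem pvDesc_len_eq (edges : List (String × String)) (b : String) :
    (pvDfsA (pvGraphsA edges).1 (2 * edges.length + 2) PySem.Set.empty [b]).length
      = ((pvDesc edges).getD b PySem.Set.empty : List String).length := by
  rw [pvDesc_getD]
  by_cases hb : b ∈ (pvSucc edges).keys
  · rw [if_pos hb]
    apply pvLen_eq_of_mem_iff (pvDfsFwd_spec edges b).1 (pvSatFrom_spec edges b).1
    intro x
    rw [(pvDfsFwd_spec edges b).2 x, (pvSatFrom_spec edges b).2 x]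
  · rw [if_neg hb]
    apply pvLen_eq_of_mem_iff (pvDfsFwd_spec edges b).1 List.nodup_nil
    intro x
    rw [(pvDfsFwd_spec edges b).2 x]
    constructor
    · intro h
      exact absurd ((mem_succ_keys edges b).mpr (pvReaches_start h)) hb
    · intro h; exact absurd h List.not_mem_nil

theorem pvSet_len_cast (s : PySem.Set String) : PySem.Set.len s = (s.length : Int) := by
  simp [PySem.Set.len]

theorem pvList_len_cast {α : Type} (s : List α) : PySem.List.len s = (s.length : Int) := by
  simp [PySem.List.len_eq]

theorem pvValue_eq (edges : List (String × String)) (n : Int) (b : String) :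
    ((PySem.Set.len (pvDfsA (pvGraphsA edges).2 (2 * edges.length + 2) PySem.Set.empty [b]) + 1,
      n - PySem.Set.len (pvDfsA (pvGraphsA edges).1 (2 * edges.length + 2) PySem.Set.empty [b]))
      : Int × Int)
    = (PySem.List.len ((pvDesc edges).items.filter (fun p => PySem.Set.contains p.2 b)) + 1,
       n - PySem.Set.len ((pvDesc edges).getD b PySem.Set.empty)) := by
  rw [pvSet_len_cast, pvSet_len_cast, pvSet_len_cast, pvList_len_cast,
    pvAnc_len_eq edges b, pvDesc_len_eq edges b]

theorem pvFoldInsert_congr {ν : Type} (vA vB : String → ν) :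
    ∀ (boats : List String) (r : PySem.Dict String ν),
      (∀ b ∈ boats, vA b = vB b) →
      boats.foldl (fun r b => r.insert b (vA b)) r
        = boats.foldl (fun r b => r.insert b (vB b)) r := by
  intro boats
  induction boats with
  | nil => intro r _; rfl
  | cons b boats ih =>
    intro r h
    simp only [List.foldl_cons]
    rw [h b List.mem_cons_self]
    exact ih _ (fun b' hb' => h b' (List.mem_cons_of_mem _ hb'))

-- ===== VERDICT (by name: the statement is the Claim_ definition above) =====
theorem compute_position_ranges_py_spec : Claim_equal_compute_position_ranges_py := by
  intro boats edges _
  unfold Spec_compute_position_ranges_py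
  unfold compute_position_ranges_py compute_position_ranges_py_alt
  refine congrArg PySem.Dict.items ?_
  exact pvFoldInsert_congr _ _ boats PySem.Dict.empty
    (fun b _ => pvValue_eq edges (PySem.List.len boats) b)
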